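-- pv_equiv track=rewrite | github.com/dfnr2/terra-eda-library | tools/migrate_to_tables.py | categorize_ic
-- ===== SOURCE A (Python) =====
-- from typing import Dict, List, Optional, Any
--
-- def categorize_ic(row: Dict[str, Any]) -> str:
--     """Categorize ICs into specific tables based on description or component type."""
--     desc = (row.get('Description') or '').lower()
--     comp_type = (row.get('Component_Type') or '').lower()
--
--     # Op-amps
--     if any(x in desc for x in ['op-amp', 'opamp', 'operational amplifier', 'instrumentation amp']):
--         return 'ic_opamp'
--     if any(x in comp_type for x in ['opamp', 'op-amp']):
--         return 'ic_opamp'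
--
--     # Microcontrollers
--     if any(x in desc for x in ['microcontroller', 'mcu', 'stm32', 'pic', 'avr', 'esp32', 'rp2040']):
--         return 'ic_microcontrollers'
--     if any(x in comp_type for x in ['microcontroller', 'mcu']):
--         return 'ic_microcontrollers'
--
--     # Logic
--     if any(x in desc for x in ['logic', 'gate', 'buffer', 'latch', 'flip-flop', 'decoder', 'mux']):
--         return 'ic_logic'
--     if comp_type.startswith('74'):  # 74 series logic
--         return 'ic_logic'
--
--     # Memory
--     if any(x in desc for x in ['memory', 'sram', 'dram', 'flash', 'eeprom', 'fram']):
--         return 'ic_memory'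
--     if any(x in comp_type for x in ['memory', 'sram', 'eeprom']):
--         return 'ic_memory'
--
--     # Drivers
--     if any(x in desc for x in ['driver', 'gate driver', 'led driver', 'motor driver']):
--         return 'ic_drivers'
--     if any(x in comp_type for x in ['driver']):
--         return 'ic_drivers'
--
--     # Default to analog
--     return 'ic_analog'
-- ===== SOURCE B (Python) =====
-- _CATS = ['ic_opamp', 'ic_opamp', 'ic_microcontrollers', 'ic_microcontrollers',
--          'ic_logic', 'ic_logic', 'ic_memory', 'ic_memory', 'ic_drivers', 'ic_drivers',
--          'ic_analog']
--
-- _DESC_KW = [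
--     (0, ['op-amp', 'opamp', 'operational amplifier', 'instrumentation amp']),
--     (2, ['microcontroller', 'mcu', 'stm32', 'pic', 'avr', 'esp32', 'rp2040']),
--     (4, ['logic', 'gate', 'buffer', 'latch', 'flip-flop', 'decoder', 'mux']),
--     (6, ['memory', 'sram', 'dram', 'flash', 'eeprom', 'fram']),
--     (8, ['driver', 'gate driver', 'led driver', 'motor driver']),
-- ]
-- _COMP_KW = [
--     (1, ['opamp', 'op-amp']),
--     (3, ['microcontroller', 'mcu']),
--     (7, ['memory', 'sram', 'eeprom']),
--     (9, ['driver']),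
-- ]
--
-- def categorize_ic(row):
--     """Categorize ICs: score every rule exhaustively, then take the best (lowest) priority hit."""
--     desc = (row.get('Description') or '').lower()
--     comp = (row.get('Component_Type') or '').lower()
--     hits = [p for p, kws in _DESC_KW if any(k in desc for k in kws)]
--     hits += [p for p, kws in _COMP_KW if any(k in comp for k in kws)]
--     if comp.startswith('74'):
--         hits.append(5)
--     return _CATS[min(hits, default=10)]
-- ===== Notes on version B (the rewrite author's own statement) =====
-- stated objective: alternative
-- what changed: Instead of A's first-match if/return chain that stops at the first hit, B evaluates every rule exhaustively, collects the priority indices of ALL matching rules into a list, and returns the category looked up at the minimum priority (default 10 = ic_analog).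
import Mathlib
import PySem

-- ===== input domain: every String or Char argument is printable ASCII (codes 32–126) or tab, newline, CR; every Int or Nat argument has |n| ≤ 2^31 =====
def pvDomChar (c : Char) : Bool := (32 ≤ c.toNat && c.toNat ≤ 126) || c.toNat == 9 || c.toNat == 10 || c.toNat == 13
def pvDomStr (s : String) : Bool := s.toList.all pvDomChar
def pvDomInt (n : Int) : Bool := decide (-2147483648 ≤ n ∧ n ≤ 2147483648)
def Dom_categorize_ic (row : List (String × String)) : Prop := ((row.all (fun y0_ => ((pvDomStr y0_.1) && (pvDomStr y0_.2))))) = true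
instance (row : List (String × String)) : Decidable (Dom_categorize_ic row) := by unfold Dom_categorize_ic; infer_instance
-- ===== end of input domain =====

-- B replaces A's first-match if/return chain by an exhaustive scoring pass: it collects the
-- priorities of ALL matching rules and returns the category of the minimum (objective: alternative).

-- ===== PORT A =====
def categorize_ic (row : List (String × String)) : String :=
  let desc := PySem.Str.lower ((((PySem.Dict.mk row).get? "Description").getD ""))
  let comp_type := PySem.Str.lower ((((PySem.Dict.mk row).get? "Component_Type").getD ""))
  if ["op-amp", "opamp", "operational amplifier", "instrumentation amp"].any (fun x => PySem.Str.isIn x desc) then "ic_opamp"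
  else if ["opamp", "op-amp"].any (fun x => PySem.Str.isIn x comp_type) then "ic_opamp"
  else if ["microcontroller", "mcu", "stm32", "pic", "avr", "esp32", "rp2040"].any (fun x => PySem.Str.isIn x desc) then "ic_microcontrollers"
  else if ["microcontroller", "mcu"].any (fun x => PySem.Str.isIn x comp_type) then "ic_microcontrollers"
  else if ["logic", "gate", "buffer", "latch", "flip-flop", "decoder", "mux"].any (fun x => PySem.Str.isIn x desc) then "ic_logic"
  else if PySem.Str.startswith comp_type "74" then "ic_logic"
  else if ["memory", "sram", "dram", "flash", "eeprom", "fram"].any (fun x => PySem.Str.isIn x desc) then "ic_memory"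
  else if ["memory", "sram", "eeprom"].any (fun x => PySem.Str.isIn x comp_type) then "ic_memory"
  else if ["driver", "gate driver", "led driver", "motor driver"].any (fun x => PySem.Str.isIn x desc) then "ic_drivers"
  else if ["driver"].any (fun x => PySem.Str.isIn x comp_type) then "ic_drivers"
  else "ic_analog"

-- ===== PORT B =====
-- _CATS: priority index → category
def pvCats : List String :=
  ["ic_opamp", "ic_opamp", "ic_microcontrollers", "ic_microcontrollers",
   "ic_logic", "ic_logic", "ic_memory", "ic_memory", "ic_drivers", "ic_drivers",
   "ic_analog"]

def pvDescKw : List (Nat × List String) :=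
  [ (0, ["op-amp", "opamp", "operational amplifier", "instrumentation amp"]),
    (2, ["microcontroller", "mcu", "stm32", "pic", "avr", "esp32", "rp2040"]),
    (4, ["logic", "gate", "buffer", "latch", "flip-flop", "decoder", "mux"]),
    (6, ["memory", "sram", "dram", "flash", "eeprom", "fram"]),
    (8, ["driver", "gate driver", "led driver", "motor driver"]) ]

def pvCompKw : List (Nat × List String) :=
  [ (1, ["opamp", "op-amp"]),
    (3, ["microcontroller", "mcu"]),
    (7, ["memory", "sram", "eeprom"]),
    (9, ["driver"]) ]

-- any(k in s for k in kws)
def pvContainsAny (kws : List String) (s : String) : Bool := kws.any (fun k => PySem.Str.isIn k s)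

-- min(xs, default=d)
def pvMinD (xs : List Nat) (d : Nat) : Nat :=
  match xs with
  | [] => d
  | h :: t => t.foldl min h

def categorize_ic_alt (row : List (String × String)) : String :=
  let desc := PySem.Str.lower ((((PySem.Dict.mk row).get? "Description").getD ""))
  let comp := PySem.Str.lower ((((PySem.Dict.mk row).get? "Component_Type").getD ""))
  let hits := (pvDescKw.filter (fun pk => pvContainsAny pk.2 desc)).map (fun pk => pk.1)
           ++ (pvCompKw.filter (fun pk => pvContainsAny pk.2 comp)).map (fun pk => pk.1)
           ++ (if PySem.Str.startswith comp "74" then [5] else [])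
  -- _CATS[min(hits, default=10)]: the index is always 0..10, hence in range; getD's default is never used
  pvCats.getD (pvMinD hits 10) ""

-- ===== PRECONDITION & SPEC =====
def Spec_categorize_ic (row : List (String × String)) (out : String) : Prop := out = categorize_ic_alt row
instance (row : List (String × String)) (out : String) : Decidable (Spec_categorize_ic row out) := by unfold Spec_categorize_ic; infer_instance

-- ===== CLAIM =====
def Claim_equal_categorize_ic : Prop := ∀ (row : List (String × String)), Dom_categorize_ic row → Spec_categorize_ic row (categorize_ic row)

-- ===== LEMMAS AND PROOFS =====
-- Evaluate the desc-side filter+map into its five per-rule singleton appends.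
theorem pvFiltDesc (d : String) :
    (pvDescKw.filter (fun pk => pvContainsAny pk.2 d)).map (fun pk => pk.1)
    = (if pvContainsAny ["op-amp", "opamp", "operational amplifier", "instrumentation amp"] d then [(0 : Nat)] else [])
      ++ (if pvContainsAny ["microcontroller", "mcu", "stm32", "pic", "avr", "esp32", "rp2040"] d then [2] else [])
      ++ (if pvContainsAny ["logic", "gate", "buffer", "latch", "flip-flop", "decoder", "mux"] d then [4] else [])
      ++ (if pvContainsAny ["memory", "sram", "dram", "flash", "eeprom", "fram"] d then [6] else [])
      ++ (if pvContainsAny ["driver", "gate driver", "led driver", "motor driver"] d then [8] else []) := by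
  simp only [pvDescKw, List.filter]
  split_ifs <;> simp_all only [Bool.not_eq_true] <;> rfl

-- Evaluate the comp-side filter+map into its four per-rule singleton appends.
theorem pvFiltComp (c : String) :
    (pvCompKw.filter (fun pk => pvContainsAny pk.2 c)).map (fun pk => pk.1)
    = (if pvContainsAny ["opamp", "op-amp"] c then [(1 : Nat)] else [])
      ++ (if pvContainsAny ["microcontroller", "mcu"] c then [3] else [])
      ++ (if pvContainsAny ["memory", "sram", "eeprom"] c then [7] else [])
      ++ (if pvContainsAny ["driver"] c then [9] else []) := by
  simp only [pvCompKw, List.filter]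
  split_ifs <;> simp_all only [Bool.not_eq_true] <;> rfl

-- Core fact over the ten rule-conditions as free booleans: the first-match chain equals
-- looking up the category of the minimum matching priority.
set_option maxHeartbeats 2000000 in
theorem pvKey : ∀ (b0 b1 b2 b3 b4 b5 b6 b7 b8 b9 : Bool),
    (if b0 then "ic_opamp"
     else if b1 then "ic_opamp"
     else if b2 then "ic_microcontrollers"
     else if b3 then "ic_microcontrollers"
     else if b4 then "ic_logic"
     else if b5 then "ic_logic"
     else if b6 then "ic_memory"
     else if b7 then "ic_memory"
     else if b8 then "ic_drivers"
     else if b9 then "ic_drivers"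
     else "ic_analog")
    = pvCats.getD (pvMinD
        (((if b0 then [(0 : Nat)] else []) ++ (if b2 then [2] else []) ++ (if b4 then [4] else [])
            ++ (if b6 then [6] else []) ++ (if b8 then [8] else []))
         ++ ((if b1 then [(1 : Nat)] else []) ++ (if b3 then [3] else []) ++ (if b7 then [7] else [])
            ++ (if b9 then [9] else []))
         ++ (if b5 then [5] else [])) 10) "" := by
  decide

-- ===== VERDICT =====
theorem categorize_ic_spec : Claim_equal_categorize_ic := by
  intro row _
  show categorize_ic row = categorize_ic_alt row
  simp only [categorize_ic, categorize_ic_alt]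
  rw [pvFiltDesc, pvFiltComp]
  simp only [pvContainsAny]
  exact pvKey _ _ _ _ _ _ _ _ _ _
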